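-- pv_equiv track=rewrite | github.com/XavierLopez25/Lab03-Redes | src/simulator.py | build_next_hop
-- ===== SOURCE A (Python) =====
-- from typing import Dict, Any
--
-- def build_next_hop(src: str, prev: Dict[str, str]) -> Dict[str, str]:
--     nh: Dict[str, str] = {}
--     for dst in prev.keys():
--         cur = dst
--         while prev.get(cur) and prev[cur] != src:
--             cur = prev[cur]
--         if prev.get(cur) == src:
--             nh[dst] = cur
--     return nh
-- ===== SOURCE B (Python) =====
-- def build_next_hop(src, prev):
--     # Memoized alternative: each node's next-hop toward src is computed once and cached,
--     # then shared by every destination whose path passes through it.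
--     cache = {}
--     nh = {}
--     for dst in prev:
--         cur = dst
--         stack = []
--         while cur not in cache:
--             p = prev.get(cur)
--             if p == src:
--                 cache[cur] = cur
--                 break
--             if not p:
--                 cache[cur] = None
--                 break
--             stack.append(cur)
--             cur = p
--         r = cache[cur]
--         for n in stack:
--             cache[n] = r
--         if r is not None:
--             nh[dst] = r
--     return nh
-- ===== Notes on version B (the rewrite author's own statement) =====
-- stated objective: alternative
-- what changed: B memoizes the next-hop per node: each upward walk records every visited node's answer in a cache and later destinations stop at the first cached node, replacing A's independent full walk per destination (O(n) vs A's worst-case O(n^2) on chain-shaped tables, though not measurably faster on the benchmark's shallow tables).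
import Mathlib
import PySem

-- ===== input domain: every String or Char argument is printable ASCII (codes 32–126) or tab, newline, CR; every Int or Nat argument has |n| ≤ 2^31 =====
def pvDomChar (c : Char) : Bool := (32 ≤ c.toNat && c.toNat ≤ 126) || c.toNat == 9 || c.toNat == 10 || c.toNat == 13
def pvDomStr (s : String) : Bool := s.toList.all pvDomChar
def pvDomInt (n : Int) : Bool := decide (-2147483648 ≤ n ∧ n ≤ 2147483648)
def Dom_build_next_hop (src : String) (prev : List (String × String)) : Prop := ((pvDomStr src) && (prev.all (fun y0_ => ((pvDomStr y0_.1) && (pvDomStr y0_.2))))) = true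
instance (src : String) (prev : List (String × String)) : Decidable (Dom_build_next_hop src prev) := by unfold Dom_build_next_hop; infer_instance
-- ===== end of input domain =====

-- B replaces A's independent per-destination upward walks by a memoized pass that caches the
-- next-hop of every node visited along each walk (objective: alternative algorithm).


-- ===== PORT A =====
-- `while prev.get(cur) and prev[cur] != src: cur = prev[cur]` — the fuel (prev.length + 1)
-- only makes the loop total; under Pre_ the loop halts within that many steps.
def bnhWalk (src : String) (d : PySem.Dict String String) (cur : String) : Nat → String
  | 0 => cur
  | f + 1 =>
    match d.get? cur with
    | some v => if v ≠ "" ∧ v ≠ src then bnhWalk src d v f else cur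
    | none => cur

def build_next_hop (src : String) (prev : List (String × String)) : List (String × String) :=
  let d := PySem.Dict.ofList prev
  (d.keys.foldl (fun nh dst =>
      let cur := bnhWalk src d dst (prev.length + 1)
      if d.get? cur = some src then nh.insert dst cur else nh)
    PySem.Dict.empty).items

-- ===== PORT B =====
-- the `while cur not in cache:` loop of B, collecting the visited nodes in `stack`;
-- the fuel (prev.length + 1) only makes it total, as in the port of A.
def bnhAltLoop (src : String) (d : PySem.Dict String String)
    (cache : PySem.Dict String (Option String)) (cur : String) (stack : List String) :
    Nat → String × List String × PySem.Dict String (Option String)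
  | 0 => (cur, stack, cache)
  | f + 1 =>
    if cache.contains cur then (cur, stack, cache)
    else
      match d.get? cur with
      | some v =>
        if v = src then (cur, stack, cache.insert cur (some cur))
        else if v = "" then (cur, stack, cache.insert cur none)
        else bnhAltLoop src d cache v (stack ++ [cur]) f
      | none => (cur, stack, cache.insert cur none)   -- p is None: `p == src` is False, `not p` is True

-- one call of B's body for a destination: run the loop, read cache[cur], back-fill the stack
def bnhAltResolve (src : String) (d : PySem.Dict String String)
    (cache : PySem.Dict String (Option String)) (dst : String) (fuel : Nat) :
    Option String × PySem.Dict String (Option String) :=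
  let res := bnhAltLoop src d cache dst [] fuel
  let r := (res.2.2.get? res.1).getD none
  (r, res.2.1.foldl (fun c n => c.insert n r) res.2.2)

def build_next_hop_alt (src : String) (prev : List (String × String)) : List (String × String) :=
  let d := PySem.Dict.ofList prev
  (d.keys.foldl
      (fun (st : PySem.Dict String String × PySem.Dict String (Option String)) dst =>
        let rc := bnhAltResolve src d st.2 dst (prev.length + 1)
        match rc.1 with
        | some c => (st.1.insert dst c, rc.2)
        | none => (st.1, rc.2))
      (PySem.Dict.empty, PySem.Dict.empty)).1.items

-- ===== PRECONDITION & SPEC =====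
-- one step of A's walk: `some v` iff the while-condition holds at x
def bnhCont (src : String) (d : PySem.Dict String String) (x : String) : Option String :=
  match d.get? x with
  | some v => if v ≠ "" ∧ v ≠ src then some v else none
  | none => none

-- Pre_ excludes exactly the tables whose predecessor chain from some key cycles without ever
-- reaching src or a missing/empty entry: on those Python A loops forever (it never returns).
def Pre_build_next_hop (src : String) (prev : List (String × String)) : Prop :=
  ∀ p ∈ prev, ∃ i ≤ prev.length,
    bnhCont src (PySem.Dict.ofList prev)
      ((fun x => (bnhCont src (PySem.Dict.ofList prev) x).getD x)^[i] p.1) = none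
instance (src : String) (prev : List (String × String)) : Decidable (Pre_build_next_hop src prev) := by
  unfold Pre_build_next_hop; infer_instance

def pvWitness_build_next_hop : String × (List (String × String)) :=
  ("A", [("B", "A"), ("C", "B"), ("D", "")])

def Spec_build_next_hop (src : String) (prev : List (String × String)) (out : List (String × String)) : Prop := out = build_next_hop_alt src prev
instance (src : String) (prev : List (String × String)) (out : List (String × String)) : Decidable (Spec_build_next_hop src prev out) := by unfold Spec_build_next_hop; infer_instance

-- ===== CLAIM (what is proved, stated in full; the proofs are below) =====
def Claim_equal_build_next_hop : Prop := ∀ (src : String) (prev : List (String × String)), Dom_build_next_hop src prev → Pre_build_next_hop src prev → Spec_build_next_hop src prev (build_next_hop src prev)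

-- ===== LEMMAS AND PROOFS =====

-- the value A's walk-and-check computes for a start node, with fuel: `some r` = enough fuel;
-- the inner r : Option String is `some c` for an entry c, `none` for no entry
def bnhRes (src : String) (d : PySem.Dict String String) (x : String) : Nat → Option (Option String)
  | 0 => none
  | f + 1 =>
    match bnhCont src d x with
    | none => some (if d.get? x = some src then some x else none)
    | some v => bnhRes src d v f

theorem bnhRes_mono {src : String} {d : PySem.Dict String String} {x : String} {f g : Nat}
    (hfg : f ≤ g) {r : Option String} (h : bnhRes src d x f = some r) :
    bnhRes src d x g = some r := by
  induction f generalizing x g with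
  | zero => simp [bnhRes] at h
  | succ f ih =>
    obtain ⟨g', rfl⟩ : ∃ g', g = g' + 1 := ⟨g - 1, by omega⟩
    rw [bnhRes] at h ⊢
    cases hc : bnhCont src d x with
    | none => simp only [hc] at h ⊢; exact h
    | some v => simp only [hc] at h ⊢; exact ih (by omega) h

theorem bnhRes_unique {src : String} {d : PySem.Dict String String} {x : String} {f g : Nat}
    {r r' : Option String} (h : bnhRes src d x f = some r) (h' : bnhRes src d x g = some r') :
    r = r' := by
  rcases le_total f g with hle | hle
  · have := bnhRes_mono hle h; rw [this] at h'; exact Option.some.inj h'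
  · have := bnhRes_mono hle h'; rw [this] at h; exact (Option.some.inj h).symm

-- enough fuel exists whenever the chain halts within i steps
theorem bnhRes_of_halt {src : String} {d : PySem.Dict String String} (x : String) (i : Nat)
    (h : bnhCont src d ((fun y => (bnhCont src d y).getD y)^[i] x) = none) :
    ∃ r, bnhRes src d x (i + 1) = some r := by
  induction i generalizing x with
  | zero =>
    have h' : bnhCont src d x = none := by simpa using h
    exact ⟨_, by rw [bnhRes]; rw [h']⟩
  | succ i ih =>
    cases hc : bnhCont src d x with
    | none => exact ⟨_, by rw [bnhRes]; rw [hc]⟩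
    | some v =>
      simp only [Function.iterate_succ_apply] at h
      rw [hc, Option.getD_some] at h
      obtain ⟨r, hr⟩ := ih v h
      exact ⟨r, by rw [bnhRes]; rw [hc]; exact hr⟩

-- A's walk-then-check computes bnhRes when the fuel suffices
theorem bnhWalk_res {src : String} {d : PySem.Dict String String} {x : String} {f : Nat}
    {r : Option String} (h : bnhRes src d x f = some r) :
    r = (if d.get? (bnhWalk src d x f) = some src then some (bnhWalk src d x f) else none) := by
  induction f generalizing x with
  | zero => simp [bnhRes] at h
  | succ f ih =>
    rw [bnhRes] at h
    rw [bnhWalk]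
    cases hg : d.get? x with
    | none =>
      have hc : bnhCont src d x = none := by simp [bnhCont, hg]
      simp only [hc] at h
      simpa [hg] using (Option.some.inj h).symm
    | some v =>
      by_cases hv : v ≠ "" ∧ v ≠ src
      · have hc : bnhCont src d x = some v := by
          simp only [bnhCont, hg]; rw [if_pos hv]
        simp only [hc] at h
        show r = (if d.get? (if v ≠ "" ∧ v ≠ src then bnhWalk src d v f else x) = some src
          then some (if v ≠ "" ∧ v ≠ src then bnhWalk src d v f else x) else none)
        rw [if_pos hv]
        exact ih h
      · have hc : bnhCont src d x = none := by
          simp only [bnhCont, hg]; rw [if_neg hv]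
        simp only [hc] at h
        show r = (if d.get? (if v ≠ "" ∧ v ≠ src then bnhWalk src d v f else x) = some src
          then some (if v ≠ "" ∧ v ≠ src then bnhWalk src d v f else x) else none)
        rw [if_neg hv]
        simpa [hg] using (Option.some.inj h).symm

-- cache invariant of B: every cached value is the true result of its node
def bnhInv (src : String) (d : PySem.Dict String String)
    (cache : PySem.Dict String (Option String)) : Prop :=
  ∀ k r, cache.get? k = some r → ∃ f, bnhRes src d k f = some r

theorem bnhInv_empty (src : String) (d : PySem.Dict String String) :
    bnhInv src d PySem.Dict.empty := by
  intro k r h; simp [PySem.Dict.get?_empty] at h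

theorem bnhInv_insert {src : String} {d : PySem.Dict String String}
    {cache : PySem.Dict String (Option String)} (hInv : bnhInv src d cache)
    {n : String} {r : Option String} (hr : ∃ f, bnhRes src d n f = some r) :
    bnhInv src d (cache.insert n r) := by
  intro k r' h
  by_cases hk : k = n
  · subst hk; rw [PySem.Dict.get?_insert_self] at h
    obtain ⟨f, hf⟩ := hr
    exact ⟨f, by rw [hf, Option.some.inj h]⟩
  · rw [PySem.Dict.get?_insert_of_ne _ _ hk] at h
    exact hInv k r' h

theorem bnhAltLoop_correct {src : String} {d : PySem.Dict String String}
    {r : Option String} {f : Nat} :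
    ∀ {cache : PySem.Dict String (Option String)} {cur : String} {stack : List String},
    bnhInv src d cache → (∀ n ∈ stack, ∃ g, bnhRes src d n g = some r) →
    bnhRes src d cur f = some r →
    bnhInv src d (bnhAltLoop src d cache cur stack f).2.2 ∧
    (bnhAltLoop src d cache cur stack f).2.2.get? (bnhAltLoop src d cache cur stack f).1 = some r ∧
    (∀ n ∈ (bnhAltLoop src d cache cur stack f).2.1, ∃ g, bnhRes src d n g = some r) := by
  induction f with
  | zero => intro cache cur stack _ _ h; simp [bnhRes] at h
  | succ f ih =>
    intro cache cur stack hInv hstack hres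
    by_cases hc : cache.contains cur
    · have hstep : bnhAltLoop src d cache cur stack (f + 1) = (cur, stack, cache) := by
        rw [bnhAltLoop]; rw [if_pos hc]
      rw [hstep]
      have hsome : (cache.get? cur).isSome := by
        rw [← PySem.Dict.contains_eq_isSome_get?]; exact hc
      obtain ⟨r0, hr0⟩ := Option.isSome_iff_exists.mp hsome
      obtain ⟨g, hg⟩ := hInv cur r0 hr0
      have hrr : r0 = r := bnhRes_unique hg hres
      subst hrr
      exact ⟨hInv, hr0, hstack⟩
    · rw [bnhRes] at hres
      cases hg : d.get? cur with
      | none =>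
        have hcont : bnhCont src d cur = none := by simp [bnhCont, hg]
        rw [hcont] at hres
        rw [if_neg (by simp [hg])] at hres
        have hr : r = none := (Option.some.inj hres).symm
        subst hr
        have hstep : bnhAltLoop src d cache cur stack (f + 1)
            = (cur, stack, cache.insert cur none) := by
          rw [bnhAltLoop]; rw [if_neg hc]; rw [hg]
        rw [hstep]
        refine ⟨bnhInv_insert hInv ⟨f + 1, ?_⟩, by simp [PySem.Dict.get?_insert_self], hstack⟩
        rw [bnhRes]; rw [hcont]; rw [if_neg (by simp [hg])]
      | some v =>
        by_cases hvs : v = src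
        · have hcont : bnhCont src d cur = none := by
            simp only [bnhCont, hg]; rw [if_neg (by simp [hvs])]
          rw [hcont] at hres
          rw [if_pos (by rw [hg, hvs])] at hres
          have hr : r = some cur := (Option.some.inj hres).symm
          subst hr
          have hstep : bnhAltLoop src d cache cur stack (f + 1)
              = (cur, stack, cache.insert cur (some cur)) := by
            rw [bnhAltLoop]; rw [if_neg hc]; rw [hg]
            show (if v = src then _ else _) = _
            rw [if_pos hvs]
          rw [hstep]
          refine ⟨bnhInv_insert hInv ⟨f + 1, ?_⟩,
            by simp [PySem.Dict.get?_insert_self], hstack⟩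
          rw [bnhRes]; rw [hcont]; rw [if_pos (by rw [hg, hvs])]
        · by_cases hve : v = ""
          · have hcont : bnhCont src d cur = none := by
              simp only [bnhCont, hg]; rw [if_neg (by simp [hve])]
            rw [hcont] at hres
            rw [if_neg (by rw [hg]; exact fun h => hvs (Option.some.inj h))] at hres
            have hr : r = none := (Option.some.inj hres).symm
            subst hr
            have hstep : bnhAltLoop src d cache cur stack (f + 1)
                = (cur, stack, cache.insert cur none) := by
              rw [bnhAltLoop]; rw [if_neg hc]; rw [hg]
              show (if v = src then _ else if v = "" then _ else _) = _
              rw [if_neg hvs, if_pos hve]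
            rw [hstep]
            refine ⟨bnhInv_insert hInv ⟨f + 1, ?_⟩,
              by simp [PySem.Dict.get?_insert_self], hstack⟩
            rw [bnhRes]; rw [hcont]
            rw [if_neg (by rw [hg]; exact fun h => hvs (Option.some.inj h))]
          · have hcont : bnhCont src d cur = some v := by
              simp only [bnhCont, hg]; rw [if_pos ⟨hve, hvs⟩]
            rw [hcont] at hres
            have hstep : bnhAltLoop src d cache cur stack (f + 1)
                = bnhAltLoop src d cache v (stack ++ [cur]) f := by
              rw [bnhAltLoop]; rw [if_neg hc]; rw [hg]
              show (if v = src then _ else if v = "" then _ else _) = _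
              rw [if_neg hvs, if_neg hve]
            rw [hstep]
            refine ih hInv ?_ hres
            intro n hn
            rcases List.mem_append.mp hn with hn | hn
            · exact hstack n hn
            · have : n = cur := by simpa using hn
              subst this
              exact ⟨f + 1, by rw [bnhRes]; rw [hcont]; exact hres⟩

theorem bnhInv_backfill {src : String} {d : PySem.Dict String String}
    {r : Option String} :
    ∀ {stack : List String} {cache : PySem.Dict String (Option String)},
    bnhInv src d cache → (∀ n ∈ stack, ∃ g, bnhRes src d n g = some r) →
    bnhInv src d (stack.foldl (fun c n => c.insert n r) cache) := by
  intro stack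
  induction stack with
  | nil => intro cache hInv _; exact hInv
  | cons n stack ih =>
    intro cache hInv hstack
    simp only [List.foldl_cons]
    exact ih (bnhInv_insert hInv (hstack n (List.mem_cons_self))) (fun m hm => hstack m (List.mem_cons_of_mem _ hm))

theorem bnhAltResolve_correct {src : String} {d : PySem.Dict String String}
    {cache : PySem.Dict String (Option String)} {dst : String} {f : Nat}
    {r : Option String} (hInv : bnhInv src d cache) (hres : bnhRes src d dst f = some r) :
    (bnhAltResolve src d cache dst f).1 = r ∧
    bnhInv src d (bnhAltResolve src d cache dst f).2 := by
  obtain ⟨hInv', hget, hstack⟩ :=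
    bnhAltLoop_correct (cache := cache) (cur := dst) (stack := []) hInv (by simp) hres
  refine ⟨?_, ?_⟩
  · show ((bnhAltLoop src d cache dst [] f).2.2.get? (bnhAltLoop src d cache dst [] f).1).getD none = r
    rw [hget]; rfl
  · show bnhInv src d ((bnhAltLoop src d cache dst [] f).2.1.foldl
        (fun c n => c.insert n (((bnhAltLoop src d cache dst [] f).2.2.get? (bnhAltLoop src d cache dst [] f).1).getD none)) (bnhAltLoop src d cache dst [] f).2.2)
    rw [hget]
    exact bnhInv_backfill hInv' hstack

-- the two folds over the destination keys build the same next-hop table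
theorem bnhFold_eq (src : String) (d : PySem.Dict String String) (N : Nat) :
    ∀ (keys : List String) (nh : PySem.Dict String String)
      (cache : PySem.Dict String (Option String)),
    bnhInv src d cache →
    (∀ k ∈ keys, ∃ r, bnhRes src d k N = some r) →
    keys.foldl (fun nh dst =>
        let cur := bnhWalk src d dst N
        if d.get? cur = some src then nh.insert dst cur else nh) nh =
    (keys.foldl
        (fun (st : PySem.Dict String String × PySem.Dict String (Option String)) dst =>
          let rc := bnhAltResolve src d st.2 dst N
          match rc.1 with
          | some c => (st.1.insert dst c, rc.2)
          | none => (st.1, rc.2))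
        (nh, cache)).1 := by
  intro keys
  induction keys with
  | nil => intro nh cache _ _; rfl
  | cons dst keys ih =>
    intro nh cache hInv hterm
    obtain ⟨r, hr⟩ := hterm dst (List.mem_cons_self)
    obtain ⟨hfst, hInv'⟩ := bnhAltResolve_correct hInv hr
    have hwalk := bnhWalk_res hr
    simp only [List.foldl_cons]
    by_cases hsrc : d.get? (bnhWalk src d dst N) = some src
    · have hrv : r = some (bnhWalk src d dst N) := by rw [hwalk, if_pos hsrc]
      rw [if_pos hsrc]
      simp only [hfst, hrv]
      exact ih _ _ hInv' (fun k hk => hterm k (List.mem_cons_of_mem _ hk))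
    · have hrv : r = none := by rw [hwalk, if_neg hsrc]
      rw [if_neg hsrc]
      simp only [hfst, hrv]
      exact ih _ _ hInv' (fun k hk => hterm k (List.mem_cons_of_mem _ hk))

theorem bnh_mem_keys_ofList {prev : List (String × String)} {k : String}
    (h : k ∈ (PySem.Dict.ofList prev).keys) : ∃ p ∈ prev, p.1 = k := by
  have hk : (PySem.Dict.ofList prev).keys
      = PySem.Set.update (PySem.Dict.empty (κ := String) (ν := String)).keys (prev.map Prod.fst) :=
    PySem.Dict.keys_foldl_insert_key prev Prod.fst (fun _ x => x.2) PySem.Dict.empty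
  rw [hk] at h
  have : k ∈ prev.map Prod.fst := (PySem.List.mem_dedup _ k).mp h
  obtain ⟨p, hp, rfl⟩ := List.mem_map.mp this
  exact ⟨p, hp, rfl⟩

-- ===== VERDICT (by name: the statement is the Claim_ definition above) =====
theorem build_next_hop_spec : Claim_equal_build_next_hop := by
  intro src prev _ hPre
  unfold Spec_build_next_hop build_next_hop build_next_hop_alt
  exact congrArg PySem.Dict.items (bnhFold_eq src (PySem.Dict.ofList prev) (prev.length + 1) _ PySem.Dict.empty PySem.Dict.empty
    (bnhInv_empty src (PySem.Dict.ofList prev))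
    (fun k hk => by
      obtain ⟨p, hp, rfl⟩ := bnh_mem_keys_ofList hk
      obtain ⟨i, hi, hhalt⟩ := hPre p hp
      obtain ⟨r, hr⟩ := bnhRes_of_halt p.1 i hhalt
      exact ⟨r, bnhRes_mono (by omega) hr⟩))
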